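-- pv_equiv track=rewrite | github.com/ealipatov/pythonJunior | home_work/task_7_1.py | sum_number
-- ===== SOURCE A (Python) =====
-- def sum_number(num):
--     _sum = 0
--     pos_num = abs(num)
--     while len(str(pos_num)) > 1:
--         digit = pos_num % 10
--         _sum += digit
--         pos_num //= 10
--     return _sum
-- ===== SOURCE B (Python) =====
-- def sum_number(num):
--     s = str(abs(num))
--     return sum(int(c) for c in s[1:])
-- ===== Notes on version B (the rewrite author's own statement) =====
-- stated objective: idiomatic
-- what changed: Replaces the while-loop with %10///10 digit extraction and the maintained pos_num accumulator by a single str(abs(num)) conversion and a sum over the characters after the leading digit.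
import Mathlib
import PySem

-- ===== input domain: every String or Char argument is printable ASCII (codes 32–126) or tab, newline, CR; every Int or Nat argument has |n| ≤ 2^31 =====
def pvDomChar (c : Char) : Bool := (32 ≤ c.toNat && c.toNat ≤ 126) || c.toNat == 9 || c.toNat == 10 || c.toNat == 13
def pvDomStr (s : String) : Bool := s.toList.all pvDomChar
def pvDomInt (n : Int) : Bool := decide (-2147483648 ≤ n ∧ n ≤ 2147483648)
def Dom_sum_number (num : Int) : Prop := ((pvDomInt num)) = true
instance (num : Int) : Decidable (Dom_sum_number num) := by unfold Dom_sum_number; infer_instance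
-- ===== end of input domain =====

-- B converts the number to its decimal string once and sums the digits after the first,
-- replacing A's while-loop with %10 // 10 extraction; return value equivalence, no side effects.


-- ===== PORT A =====
-- the loop condition is false at pos_num = 0 (str(0) = "0" has length 1); cited by the termination proof
theorem pvCond_ne_zero : ¬ (1 < PySem.Str.len (PySem.Int.toStr 0)) := by decide

-- the while-loop of A: state (_sum, pos_num); pos_num stays nonnegative (it starts at abs(num))
def pvSumLoop (s : Int) (p : Int) (hp : 0 ≤ p) : Int :=
  if h : 1 < PySem.Str.len (PySem.Int.toStr p) then
    pvSumLoop (s + PySem.Int.mod p 10) (PySem.Int.floordiv p 10)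
      (by rw [PySem.Int.floordiv_eq_ediv_of_pos (by omega)]; omega)
  else s
termination_by p.toNat
decreasing_by
  have hz : p ≠ 0 := by rintro rfl; exact pvCond_ne_zero h
  rw [PySem.Int.floordiv_eq_ediv_of_pos (by omega)]
  omega

def sum_number (num : Int) : Int := pvSumLoop 0 |num| (abs_nonneg num)

-- ===== PORT B =====
-- int(c) for a single decimal digit character c (the only characters str(abs(num)) contains)
-- is exactly c.toNat - 48; ported by hand, exact on that domain
def sum_number_alt (num : Int) : Int :=
  ((PySem.Str.slice (PySem.Int.toStr |num|) (some 1) none).toList.map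
    (fun c => ((c.toNat : Int) - 48))).sum

-- ===== PRECONDITION & SPEC =====
def Spec_sum_number (num : Int) (out : Int) : Prop := out = sum_number_alt num
instance (num : Int) (out : Int) : Decidable (Spec_sum_number num out) := by unfold Spec_sum_number; infer_instance

-- ===== CLAIM (what is proved, stated in full; the proofs are below) =====
def Claim_equal_sum_number : Prop := ∀ (num : Int), Dom_sum_number num → Spec_sum_number num (sum_number num)

-- ===== LEMMAS AND PROOFS =====

-- toDigitsCore accumulates on the right
theorem pvTdc_append (b : Nat) : ∀ (f n : Nat) (l : List Char),
    Nat.toDigitsCore b f n l = Nat.toDigitsCore b f n [] ++ l := by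
  intro f
  induction f with
  | zero => intro n l; simp [Nat.toDigitsCore]
  | succ f ih =>
    intro n l
    simp only [Nat.toDigitsCore]
    by_cases h : n / b = 0
    · simp [h]
    · simp only [h, if_false]
      rw [ih (n / b) ((n % b).digitChar :: l), ih (n / b) [(n % b).digitChar]]
      simp

-- any sufficient fuel computes Nat.toDigits
theorem pvTdc_fuel : ∀ (n f : Nat), n < f →
    Nat.toDigitsCore 10 f n [] = Nat.toDigits 10 n := by
  intro n
  induction n using Nat.strong_induction_on with
  | _ n ih =>
    intro f hf
    obtain ⟨f', rfl⟩ : ∃ f', f = f' + 1 := ⟨f - 1, by omega⟩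
    show Nat.toDigitsCore 10 (f' + 1) n [] = Nat.toDigitsCore 10 (n + 1) n []
    simp only [Nat.toDigitsCore]
    by_cases h : n / 10 = 0
    · simp [h]
    · have hn : 10 ≤ n := by omega
      simp only [h, if_false]
      rw [pvTdc_append 10 f' (n / 10), pvTdc_append 10 n (n / 10)]
      have h1 : Nat.toDigitsCore 10 f' (n / 10) [] = Nat.toDigits 10 (n / 10) :=
        ih (n / 10) (by omega) f' (by omega)
      have h2 : Nat.toDigitsCore 10 n (n / 10) [] = Nat.toDigits 10 (n / 10) :=
        ih (n / 10) (by omega) n (by omega)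
      rw [h1, h2]

theorem pvToDigits_step (n : Nat) (h : 10 ≤ n) :
    Nat.toDigits 10 n = Nat.toDigits 10 (n / 10) ++ [(n % 10).digitChar] := by
  show Nat.toDigitsCore 10 (n + 1) n [] = _
  simp only [Nat.toDigitsCore]
  have h0 : ¬ (n / 10 = 0) := by omega
  simp only [h0, if_false]
  rw [pvTdc_append 10 n (n / 10), pvTdc_fuel (n / 10) n (by omega)]

theorem pvToDigits_small (n : Nat) (h : n < 10) :
    Nat.toDigits 10 n = [n.digitChar] := by
  show Nat.toDigitsCore 10 (n + 1) n [] = _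
  have h0 : n / 10 = 0 := by omega
  have h1 : n % 10 = n := by omega
  simp [Nat.toDigitsCore, h0, h1]

theorem pvToDigits_ne_nil (n : Nat) : Nat.toDigits 10 n ≠ [] := by
  by_cases h : n < 10
  · rw [pvToDigits_small n h]; simp
  · rw [pvToDigits_step n (by omega)]; simp

theorem pvLen_iff (n : Nat) : 1 < (Nat.toDigits 10 n).length ↔ 10 ≤ n := by
  constructor
  · intro h
    by_contra hn
    rw [pvToDigits_small n (by omega)] at h
    simp at h
  · intro h
    rw [pvToDigits_step n h]
    have := pvToDigits_ne_nil (n / 10)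
    have : 0 < (Nat.toDigits 10 (n / 10)).length := List.length_pos_iff.mpr this
    simp [List.length_append]
    omega

theorem pvDigitChar_val (d : Nat) (h : d < 10) :
    ((d.digitChar).toNat : Int) - 48 = (d : Int) := by
  interval_cases d <;> decide

-- loop condition on a nonnegative Int state, as a fact about the magnitude
theorem pvCond_iff (p : Int) (hp : 0 ≤ p) :
    (1 < PySem.Str.len (PySem.Int.toStr p)) ↔ 10 ≤ p := by
  rw [PySem.Str.len_eq, PySem.Int.toList_toStr, PySem.Int.toChars]
  have h0 : ¬ p < 0 := by omega
  simp only [h0, if_false]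
  constructor
  · intro h
    have : 1 < (Nat.toDigits 10 p.toNat).length := by exact_mod_cast h
    have := (pvLen_iff p.toNat).mp this
    omega
  · intro h
    have : 10 ≤ p.toNat := by omega
    have := (pvLen_iff p.toNat).mpr this
    exact_mod_cast this

-- pvSumLoop only depends on the value of its state, not the nonnegativity proof
theorem pvSumLoop_congr (s p p' : Int) (hp : 0 ≤ p) (hp' : 0 ≤ p') (h : p = p') :
    pvSumLoop s p hp = pvSumLoop s p' hp' := by subst h; rfl

-- the loop computes: initial sum + sum of all digits of n except the leading one
theorem pvSumLoop_eq (n : Nat) : ∀ (s : Int) (hp : 0 ≤ ((n : Nat) : Int)),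
    pvSumLoop s (n : Int) hp =
      s + (((Nat.toDigits 10 n).drop 1).map (fun c => ((c.toNat : Int) - 48))).sum := by
  induction n using Nat.strong_induction_on with
  | _ n ih =>
    intro s hp
    rw [pvSumLoop]
    by_cases h : 1 < PySem.Str.len (PySem.Int.toStr (n : Int))
    · have hn : 10 ≤ n := by
        have := (pvCond_iff (n : Int) hp).mp h
        omega
      simp only [h, dif_pos]
      have hm : PySem.Int.mod (n : Int) 10 = ((n % 10 : Nat) : Int) := by
        exact_mod_cast PySem.Int.mod_natCast n 10
      have hf : PySem.Int.floordiv (n : Int) 10 = ((n / 10 : Nat) : Int) := by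
        exact_mod_cast PySem.Int.floordiv_natCast n 10
      rw [pvSumLoop_congr _ _ _ _ (by positivity) hf, hm]
      rw [ih (n / 10) (by omega)]
      rw [pvToDigits_step n hn]
      have hne := pvToDigits_ne_nil (n / 10)
      rw [List.drop_append_of_le_length (by
        have : 0 < (Nat.toDigits 10 (n / 10)).length := List.length_pos_iff.mpr hne
        omega)]
      rw [List.map_append, List.sum_append]
      simp only [List.map_cons, List.map_nil, List.sum_cons, List.sum_nil]
      rw [pvDigitChar_val (n % 10) (by omega)]
      push_cast
      ring
    · have hn : n < 10 := by
        by_contra hc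
        exact h ((pvCond_iff (n : Int) hp).mpr (by omega))
      simp only [h, dif_neg, not_false_iff]
      rw [pvToDigits_small n hn]
      simp

theorem pvAlt_eq (num : Int) :
    sum_number_alt num =
      (((Nat.toDigits 10 num.natAbs).drop 1).map (fun c => ((c.toNat : Int) - 48))).sum := by
  unfold sum_number_alt
  rw [PySem.Str.toList_slice, PySem.Chars.slice_eq_listSlice,
      PySem.List.slice_from _ (by omega : (0:Int) ≤ 1)]
  rw [PySem.Int.toList_toStr, PySem.Int.toChars]
  have h0 : ¬ |num| < 0 := not_lt.mpr (abs_nonneg num)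
  simp only [h0, if_false]
  have habs : Int.toNat |num| = num.natAbs := by
    rcases le_or_gt 0 num with h | h
    · rw [abs_of_nonneg h]; omega
    · rw [abs_of_neg h]; omega
  rw [habs]
  norm_num

-- ===== VERDICT (by name: the statement is the Claim_ definition above) =====
theorem sum_number_spec : Claim_equal_sum_number := by
  intro num _
  show sum_number num = sum_number_alt num
  unfold sum_number
  have habs : |num| = ((num.natAbs : Nat) : Int) := Int.abs_eq_natAbs num
  rw [pvAlt_eq]
  rw [pvSumLoop_congr 0 |num| ((num.natAbs : Nat) : Int) (abs_nonneg num) (by positivity) habs]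
  rw [pvSumLoop_eq num.natAbs 0 (by positivity)]
  ring
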